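-- pv_equiv track=rewrite | github.com/contextmachine/mmcore | mmcore/iterutils.py | shift_circular
-- ===== SOURCE A (Python) =====
-- from itertools import tee, cycle
--
-- def shift_circular(iterable, n=2):
--     clit = tee(cycle(iterable), n)
--     for i in range(n):
--         for _ in range(i):
--             clit[i].__next__()
--     it = zip(*clit)
--     for _ in iterable:
--         yield next(it)
-- ===== SOURCE B (Python) =====
-- def shift_circular(iterable, n=2):
--     items = list(iterable)
--     L = len(items)
--     for i in range(L):
--         yield tuple(items[(i + j) % L] for j in range(n))
-- ===== Notes on version B (the rewrite author's own statement) =====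
-- stated objective: idiomatic
-- what changed: Materializes the input once and yields each window by modular indexing items[(i+j)%L], replacing the tee/cycle/zip iterator plumbing and its per-iterator advancing loops.
import Mathlib
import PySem

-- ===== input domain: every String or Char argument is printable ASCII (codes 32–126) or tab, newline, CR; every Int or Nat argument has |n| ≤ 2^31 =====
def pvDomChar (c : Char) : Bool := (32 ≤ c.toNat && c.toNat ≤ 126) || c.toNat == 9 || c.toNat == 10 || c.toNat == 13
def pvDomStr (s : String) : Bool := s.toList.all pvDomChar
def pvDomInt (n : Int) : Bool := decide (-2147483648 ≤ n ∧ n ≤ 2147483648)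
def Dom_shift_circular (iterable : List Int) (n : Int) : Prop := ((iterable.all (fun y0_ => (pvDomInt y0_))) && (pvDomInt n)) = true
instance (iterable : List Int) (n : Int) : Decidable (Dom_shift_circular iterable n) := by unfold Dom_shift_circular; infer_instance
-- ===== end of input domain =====

-- B replaces A's tee/cycle/zip iterator plumbing with modular indexing into the materialized list (idiomatic, same cost).


-- ===== PORT A =====
-- A tees a cycle of the iterable into n iterators, advances the i-th by i steps, zips
-- them and yields one zipped tuple per input element. The n tee'd cycle iterators are
-- modelled by their current positions (the i-th starts at i); one zip step reads each
-- iterator at its position modulo L and advances every position by one. Exact wherever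
-- the Python returns (Pre_).
def shiftCircularZipLoop (iterable : List Int) (L : Nat) (posns : List Nat) : Nat → List (List Int)
  | 0 => []
  | count + 1 =>
      (posns.map fun p => iterable.getD (p % L) 0) ::
        shiftCircularZipLoop iterable L (posns.map (· + 1)) count

def shift_circular (iterable : List Int) (n : Int) : List (List Int) :=
  shiftCircularZipLoop iterable iterable.length (List.range n.toNat) iterable.length

-- ===== PORT B =====
def shift_circular_alt (iterable : List Int) (n : Int) : List (List Int) :=
  let L := iterable.length
  (List.range L).map fun i => (List.range n.toNat).map fun j => iterable.getD ((i + j) % L) 0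

-- ===== PRECONDITION & SPEC =====
-- Pre_ excludes exactly the inputs where the Python A raises: n < 0 (ValueError from
-- tee); n = 0 with a nonempty iterable (StopIteration from next(zip()) leaks as
-- RuntimeError); and an empty iterable with n ≥ 2 (advancing a tee of cycle([]) raises
-- StopIteration → RuntimeError). On every input where A returns, B matches it.
def Pre_shift_circular (iterable : List Int) (n : Int) : Prop :=
  0 ≤ n ∧ ((iterable = [] ∧ n ≤ 1) ∨ (iterable ≠ [] ∧ 1 ≤ n))
instance (iterable : List Int) (n : Int) : Decidable (Pre_shift_circular iterable n) := by
  unfold Pre_shift_circular; infer_instance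

def pvWitness_shift_circular : List Int × Int := ([1, 2, 3], 2)

def Spec_shift_circular (iterable : List Int) (n : Int) (out : List (List Int)) : Prop :=
  out = shift_circular_alt iterable n
instance (iterable : List Int) (n : Int) (out : List (List Int)) :
    Decidable (Spec_shift_circular iterable n out) := by unfold Spec_shift_circular; infer_instance

-- ===== CLAIM (what is proved, stated in full; the proofs are below) =====
def Claim_equal_shift_circular : Prop := ∀ (iterable : List Int) (n : Int),
  Dom_shift_circular iterable n → Pre_shift_circular iterable n →
  Spec_shift_circular iterable n (shift_circular iterable n)

-- ===== LEMMAS AND PROOFS =====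

-- The zip loop's rows are B's rows shifted by the loop's start positions.
theorem shiftCircularZipLoop_eq (iterable : List Int) (L : Nat) :
    ∀ (count : Nat) (posns : List Nat), shiftCircularZipLoop iterable L posns count
      = (List.range count).map fun c => posns.map fun p => iterable.getD ((p + c) % L) 0 := by
  intro count
  induction count with
  | zero => intro posns; rfl
  | succ k ih =>
      intro posns
      simp only [shiftCircularZipLoop, ih, List.range_succ_eq_map, List.map_cons, List.map_map]
      congr 1
      · apply List.map_congr_left
        intro c _
        apply List.map_congr_left
        intro p _
        simp only [Function.comp]
        congr 2
        omega

-- ===== VERDICT (by name: the statement is the Claim_ definition above) =====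
theorem shift_circular_spec : Claim_equal_shift_circular := by
  intro iterable n _ _
  unfold Spec_shift_circular shift_circular shift_circular_alt
  rw [shiftCircularZipLoop_eq]
  apply List.map_congr_left
  intro c _
  apply List.map_congr_left
  intro p _
  congr 2
  omega
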